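-- pv_equiv track=rewrite | github.com/gtklocker/nipopow-verifier-paper | nipopow_verifier/tools/proof/create_proof.py | create_fixed_fork_proof
-- ===== SOURCE A (Python) =====
-- def create_fixed_fork_proof(proof, fork_proof):
--     """
--     Creates the subset of the fork_proof which different than the original
--     """
--
--     lca = 0
--     fixed_fork_proof = []
--
--     for fp in fork_proof:
--         try:
--             lca = proof.index(fp)
--             break
--         except ValueError as e:
--             fixed_fork_proof.append(fp)
--             continue
--
--     return fixed_fork_proof, lca - 1
-- ===== SOURCE B (Python) =====
-- def create_fixed_fork_proof(proof, fork_proof):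
--     """Index-based: map each value to its first position in fork_proof, then scan
--     proof to find the minimal boundary position; slice the prefix there."""
--     pos = {}
--     for i, v in enumerate(fork_proof):
--         pos.setdefault(v, i)
--     cut = len(fork_proof)
--     for v in proof:
--         if v in pos and pos[v] < cut:
--             cut = pos[v]
--     if cut == len(fork_proof):
--         return list(fork_proof), -1
--     return fork_proof[:cut], proof.index(fork_proof[cut]) - 1
-- ===== Notes on version B (the rewrite author's own statement) =====
-- stated objective: alternative
-- what changed: Instead of walking fork_proof and probing proof.index at each step, B builds a first-occurrence position map of fork_proof once, then scans PROOF to find the minimal boundary position and produces the prefix as a single slice.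
import Mathlib
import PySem

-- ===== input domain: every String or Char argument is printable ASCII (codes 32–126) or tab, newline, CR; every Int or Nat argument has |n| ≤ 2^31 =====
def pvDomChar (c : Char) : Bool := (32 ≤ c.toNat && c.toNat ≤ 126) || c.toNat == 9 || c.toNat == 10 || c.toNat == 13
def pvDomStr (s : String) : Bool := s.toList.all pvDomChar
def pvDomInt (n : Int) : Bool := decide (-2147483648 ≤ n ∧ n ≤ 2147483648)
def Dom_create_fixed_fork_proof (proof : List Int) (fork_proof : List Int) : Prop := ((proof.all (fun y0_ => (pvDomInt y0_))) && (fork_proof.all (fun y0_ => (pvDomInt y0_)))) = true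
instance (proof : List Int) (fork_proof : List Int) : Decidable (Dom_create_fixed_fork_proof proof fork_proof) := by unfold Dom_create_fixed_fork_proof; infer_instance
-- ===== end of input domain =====

-- B replaces A's accumulate-while-probing loop over fork_proof by an index-based
-- algorithm: a first-occurrence position map of fork_proof, a scan of PROOF for the
-- minimal boundary position, and one slice; return values proved equal on all inputs.

-- ===== PORT A =====
-- the for-loop over fork_proof: acc = fixed_fork_proof; lca is 0 unless the break fires
def aLoop (proof : List Int) (acc : List Int) : List Int → List Int × Int
  | [] => (acc, (0 : Int) - 1)
  | fp :: rest =>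
    match PySem.List.index? proof fp with
    | some i => (acc, (i : Int) - 1)          -- lca = proof.index(fp); break
    | none => aLoop proof (acc ++ [fp]) rest  -- ValueError: append and continue

def create_fixed_fork_proof (proof : List Int) (fork_proof : List Int) : List Int × Int :=
  aLoop proof [] fork_proof

-- ===== PORT B =====
-- 'for i, v in enumerate(fork_proof): pos.setdefault(v, i)'
def bPosLoop (d : PySem.Dict Int Nat) (i : Nat) : List Int → PySem.Dict Int Nat
  | [] => d
  | v :: rest => bPosLoop (d.setdefault v i) (i + 1) rest

def create_fixed_fork_proof_alt (proof : List Int) (fork_proof : List Int) : List Int × Int :=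
  let pos := bPosLoop PySem.Dict.empty 0 fork_proof
  -- 'for v in proof: if v in pos and pos[v] < cut: cut = pos[v]'
  let cut := proof.foldl (fun c v =>
    match pos.get? v with
    | some j => if j < c then j else c
    | none => c) fork_proof.length
  if cut = fork_proof.length then (fork_proof, -1)
  else (fork_proof.take cut,
        ((PySem.List.index? proof (fork_proof.getD cut 0)).getD 0 : Int) - 1)

-- ===== PRECONDITION & SPEC =====
def Spec_create_fixed_fork_proof (proof : List Int) (fork_proof : List Int) (out : List Int × Int) : Prop := out = create_fixed_fork_proof_alt proof fork_proof
instance (proof : List Int) (fork_proof : List Int) (out : List Int × Int) : Decidable (Spec_create_fixed_fork_proof proof fork_proof out) := by unfold Spec_create_fixed_fork_proof; infer_instance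

-- ===== CLAIM (what is proved, stated in full; the proofs are below) =====
def Claim_equal_create_fixed_fork_proof : Prop := ∀ (proof : List Int) (fork_proof : List Int), Dom_create_fixed_fork_proof proof fork_proof → Spec_create_fixed_fork_proof proof fork_proof (create_fixed_fork_proof proof fork_proof)

-- ===== LEMMAS AND PROOFS =====

-- index (in l) of the first element that belongs to proof; l.length if none
def firstHit (proof : List Int) : List Int → Nat
  | [] => 0
  | x :: xs => if x ∈ proof then 0 else firstHit proof xs + 1

lemma firstHit_le (proof : List Int) : ∀ l : List Int, firstHit proof l ≤ l.length := by
  intro l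
  induction l with
  | nil => simp [firstHit]
  | cons x xs ih =>
    by_cases h : x ∈ proof
    · simp [firstHit, h]
    · simp [firstHit, h]; omega

lemma firstHit_hit (proof : List Int) : ∀ l : List Int,
    firstHit proof l < l.length → l.getD (firstHit proof l) 0 ∈ proof := by
  intro l
  induction l with
  | nil => simp [firstHit]
  | cons x xs ih =>
    by_cases h : x ∈ proof
    · simp [firstHit, h]
    · simp only [firstHit, h, if_false, List.length_cons, List.getD_cons_succ]
      intro hlt; exact ih (by omega)

lemma firstHit_le_index (proof : List Int) : ∀ (l : List Int) (v : Int) (j : Nat),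
    v ∈ proof → PySem.List.index? l v = some j → firstHit proof l ≤ j := by
  intro l
  induction l with
  | nil => intro v j _ h; simp [PySem.List.index?, List.idxOf?] at h
  | cons x xs ih =>
    intro v j hv h
    by_cases hx : x ∈ proof
    · simp [firstHit, hx]
    · have hne : x ≠ v := fun he => hx (he ▸ hv)
      rw [PySem.List.index?_cons_of_ne xs hne] at h
      cases hj : PySem.List.index? xs v with
      | none => rw [hj] at h; simp at h
      | some j' =>
        rw [hj] at h; simp at h
        have := ih v j' hv hj
        simp [firstHit, hx]; omega

-- A's loop computes the firstHit characterisation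
lemma aLoop_eq (proof : List Int) : ∀ (fork acc : List Int),
    aLoop proof acc fork =
      (if firstHit proof fork = fork.length then (acc ++ fork, (-1 : Int))
       else (acc ++ fork.take (firstHit proof fork),
             ((PySem.List.index? proof (fork.getD (firstHit proof fork) 0)).getD 0 : Int) - 1)) := by
  intro fork
  induction fork with
  | nil => intro acc; simp [aLoop, firstHit]
  | cons fp rest ih =>
    intro acc
    by_cases hmem : fp ∈ proof
    · obtain ⟨i, hi⟩ := Option.isSome_iff_exists.1 ((PySem.List.index?_isSome_iff proof fp).2 hmem)
      have hi' : List.idxOf? fp proof = some i := by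
        rw [← PySem.List.index?_eq_idxOf?]; exact hi
      simp [aLoop, firstHit, hmem, hi']
    · have hnone : PySem.List.index? proof fp = none :=
        (PySem.List.index?_eq_none_iff proof fp).2 hmem
      simp only [aLoop, firstHit, hmem, if_false, hnone, List.length_cons]
      rw [ih (acc ++ [fp])]
      by_cases hlen : firstHit proof rest = rest.length
      · simp [hlen, List.append_assoc]
      · have h2 : ¬ (firstHit proof rest + 1 = rest.length + 1) := by omega
        simp [hlen, List.take_succ_cons, List.append_assoc]

-- the position dict looks up the first-occurrence index
lemma get?_bPosLoop : ∀ (l : List Int) (d : PySem.Dict Int Nat) (i : Nat) (v : Int),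
    (bPosLoop d i l).get? v =
      match d.get? v with
      | some j => some j
      | none => (PySem.List.index? l v).map (· + i) := by
  intro l
  induction l with
  | nil =>
    intro d i v
    have h0 : PySem.List.index? ([] : List Int) v = none :=
      (PySem.List.index?_eq_none_iff _ v).2 (by simp)
    rw [bPosLoop, h0]; cases hd : d.get? v <;> simp
  | cons a rest ih =>
    intro d i v
    rw [bPosLoop, ih]
    by_cases hva : v = a
    · subst hva
      rw [PySem.Dict.get?_setdefault_self d v i]
      cases hd : d.get? v with
      | some j => simp
      | none =>
        simp only [Option.getD_none]
        rw [PySem.List.index?_cons_self]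
        simp
    · have hsd : (d.setdefault a i).get? v = d.get? v := by
        by_cases hc : d.contains a = true
        · rw [PySem.Dict.setdefault_of_contains d i hc]
        · rw [PySem.Dict.setdefault_of_not_contains d i (by simpa using hc),
              PySem.Dict.get?_insert_of_ne d i hva]
      rw [hsd]
      cases hd : d.get? v with
      | some j => simp
      | none =>
        rw [PySem.List.index?_cons_of_ne rest (Ne.symm hva)]
        cases PySem.List.index? rest v
        · simp
        · simp only [Option.map_some]
          congr 1
          omega

-- B's min-fold: the step function and its bounds
def bStep (fork : List Int) (c : Nat) (v : Int) : Nat :=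
  match PySem.List.index? fork v with
  | some j => if j < c then j else c
  | none => c

lemma bStep_le (fork : List Int) (c : Nat) (v : Int) : bStep fork c v ≤ c := by
  unfold bStep
  rcases PySem.List.index? fork v with _ | j
  · simp
  · simp only
    split <;> omega

lemma bFold_le_init (fork : List Int) : ∀ (pr : List Int) (c : Nat),
    pr.foldl (bStep fork) c ≤ c := by
  intro pr
  induction pr with
  | nil => simp
  | cons v rest ih =>
    intro c
    calc rest.foldl (bStep fork) (bStep fork c v) ≤ bStep fork c v := ih _
         _ ≤ c := bStep_le fork c v

lemma bFold_le_found (fork : List Int) : ∀ (pr : List Int) (c : Nat) (v : Int) (j : Nat),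
    v ∈ pr → PySem.List.index? fork v = some j → pr.foldl (bStep fork) c ≤ j := by
  intro pr
  induction pr with
  | nil => intro c v j h; simp at h
  | cons w rest ih =>
    intro c v j hv hj
    rcases List.mem_cons.1 hv with h | h
    · subst h
      have hstep : bStep fork c v ≤ j := by
        unfold bStep; rw [hj]; simp only; split <;> omega
      calc rest.foldl (bStep fork) (bStep fork c v) ≤ bStep fork c v := bFold_le_init fork _ _
           _ ≤ j := hstep
    · exact ih _ v j h hj

lemma bFold_ge (fork : List Int) (F : Nat) : ∀ (pr : List Int) (c : Nat),
    (∀ v ∈ pr, ∀ j, PySem.List.index? fork v = some j → F ≤ j) → F ≤ c →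
    F ≤ pr.foldl (bStep fork) c := by
  intro pr
  induction pr with
  | nil => intro c _ hc; simpa using hc
  | cons w rest ih =>
    intro c hall hc
    apply ih _ (fun v hv => hall v (List.mem_cons_of_mem w hv))
    unfold bStep
    cases hw : PySem.List.index? fork w with
    | none => exact hc
    | some j =>
      have := hall w (List.mem_cons_self) j hw
      simp only
      split <;> omega

-- the fold over proof computes firstHit proof fork
lemma bFold_eq_firstHit (proof fork : List Int) :
    proof.foldl (bStep fork) fork.length = firstHit proof fork := by
  apply Nat.le_antisymm
  · -- fold ≤ firstHit
    by_cases hF : firstHit proof fork = fork.length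
    · rw [hF]; exact bFold_le_init fork proof _
    · have hlt : firstHit proof fork < fork.length :=
        lt_of_le_of_ne (firstHit_le proof fork) hF
      set v := fork.getD (firstHit proof fork) 0 with hv
      have hvp : v ∈ proof := firstHit_hit proof fork hlt
      have hvf : v ∈ fork := by
        rw [hv, List.getD_eq_getElem fork 0 hlt]
        exact List.getElem_mem hlt
      obtain ⟨j, hj⟩ := Option.isSome_iff_exists.1
        ((PySem.List.index?_isSome_iff fork v).2 hvf)
      obtain ⟨hjlt, hjv, hjmin⟩ := PySem.List.getElem_of_index?_eq_some hj
      have hjF : j ≤ firstHit proof fork := by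
        by_contra hgt
        exact hjmin (firstHit proof fork) (by omega)
          (by rw [← List.getD_eq_getElem fork 0 hlt])
      calc proof.foldl (bStep fork) fork.length ≤ j := bFold_le_found fork proof _ v j hvp hj
           _ ≤ firstHit proof fork := hjF
  · -- firstHit ≤ fold
    apply bFold_ge
    · intro v hv j hj
      exact firstHit_le_index proof fork v j hv hj
    · exact firstHit_le proof fork

-- ===== VERDICT (by name: the statement is the Claim_ definition above) =====
theorem create_fixed_fork_proof_spec : Claim_equal_create_fixed_fork_proof := by
  intro proof fork _
  show create_fixed_fork_proof proof fork = create_fixed_fork_proof_alt proof fork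
  rw [create_fixed_fork_proof, aLoop_eq proof fork []]
  unfold create_fixed_fork_proof_alt
  have hfun : (fun (c : Nat) (v : Int) =>
      match (bPosLoop PySem.Dict.empty 0 fork).get? v with
      | some j => if j < c then j else c
      | none => c) = bStep fork := by
    funext c v
    rw [get?_bPosLoop fork PySem.Dict.empty 0 v]
    simp only [PySem.Dict.get?_empty]
    unfold bStep
    cases PySem.List.index? fork v <;> simp
  simp only [hfun, bFold_eq_firstHit proof fork, List.nil_append]
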